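-- pv_equiv track=rewrite | github.com/Merzouk-Ilyes/Autoview | MV_Condidate_Generation/computing_cost.py | getSelections
-- ===== SOURCE A (Python) =====
-- def getSelections(selections, successors1):
--     for s in selections:
--         if "_J_"  in s:
--             s = s.split("_J_")
--             getSelections(s,successors1)
--         elif s.startswith("s"):
--             successors1.append(s)
--
--     return successors1
-- ===== SOURCE B (Python) =====
-- def getSelections(selections, successors1):
--     # One flat pass: split unconditionally (a no-op when "_J_" is absent) and
--     # keep the pieces that start with "s"; no recursion is needed because a
--     # piece produced by split can never contain the separator again.
--     for s in selections:
--         successors1.extend(p for p in s.split("_J_") if p.startswith("s"))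
--     return successors1
-- ===== Notes on version B (the rewrite author's own statement) =====
-- stated objective: simpler
-- what changed: A's self-recursion collapses to one flat pass that unconditionally splits each string on '_J_' (a no-op when absent) and keeps the pieces starting with 's', using the fact that split pieces can never contain the separator; both versions mutate successors1 in place identically.
import Mathlib
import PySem

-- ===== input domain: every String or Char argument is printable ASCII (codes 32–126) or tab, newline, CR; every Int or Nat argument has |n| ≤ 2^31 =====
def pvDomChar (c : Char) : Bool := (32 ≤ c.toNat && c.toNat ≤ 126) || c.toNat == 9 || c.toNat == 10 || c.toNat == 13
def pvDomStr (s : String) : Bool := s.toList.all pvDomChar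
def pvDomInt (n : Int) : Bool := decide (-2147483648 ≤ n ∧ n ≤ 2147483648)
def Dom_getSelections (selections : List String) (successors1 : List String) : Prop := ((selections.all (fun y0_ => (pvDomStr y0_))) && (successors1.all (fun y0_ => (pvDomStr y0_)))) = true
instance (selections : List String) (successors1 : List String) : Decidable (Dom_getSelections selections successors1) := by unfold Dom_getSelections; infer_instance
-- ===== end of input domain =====

-- B is simpler: split pieces never contain the separator again, so A's recursion
-- collapses to one flat split-and-filter pass. Both Pythons mutate successors1
-- in place the same way; the equivalence proved is about the returned value.

-- measure used only for termination of port A (3·length + 2 per string)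
def pvMu3 (l : List (List Char)) : Nat := (l.map (fun p => 3 * p.length + 2)).sum

def pvMuSel (xs : List String) : Nat := (xs.map (fun s => 3 * s.toList.length + 2)).sum

-- splitOn's pieces are strictly smaller in the measure when the separator occurs;
-- these termination lemmas must stay above port A, which cites pvSplit_lt.
theorem pvMu3_go_le (sep : List Char) (hsep : sep ≠ []) :
    ∀ fuel l cur acc, l.length ≤ fuel →
      pvMu3 (PySem.Chars.splitOn.go sep fuel l cur acc) ≤
        pvMu3 acc + 3 * cur.length + 3 * l.length + 2 := by
  intro fuel
  induction fuel with
  | zero =>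
    intro l cur acc hl
    have hl0 : l = [] := List.eq_nil_of_length_eq_zero (Nat.le_zero.mp hl)
    subst hl0
    simp [PySem.Chars.splitOn.go, pvMu3]
    omega
  | succ f ih =>
    intro l cur acc hl
    match l with
    | [] => simp [PySem.Chars.splitOn.go, pvMu3]; omega
    | c :: rest =>
      rw [PySem.Chars.splitOn.go]
      by_cases hp : sep.isPrefixOf (c :: rest) = true
      · rw [if_pos hp]
        have hsl : 1 ≤ sep.length := by
          cases sep with
          | nil => exact absurd rfl hsep
          | cons a b => simp
        have hle : sep.length ≤ (c :: rest).length :=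
          (List.isPrefixOf_iff_prefix.mp hp).length_le
        have hfuel : ((c :: rest).drop sep.length).length ≤ f := by
          simp only [List.length_drop]
          omega
        have := ih ((c :: rest).drop sep.length) [] (cur.reverse :: acc) hfuel
        simp only [List.length_drop, List.length_nil, List.length_cons] at this ⊢
        have hacc : pvMu3 (cur.reverse :: acc) = pvMu3 acc + 3 * cur.length + 2 := by
          simp [pvMu3]; ring
        rw [hacc] at this
        simp only [List.length_cons] at hle ⊢
        omega
      · rw [if_neg hp]
        have := ih rest (c :: cur) acc (by simpa using Nat.le_of_succ_le_succ (by simpa using hl))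
        simp only [List.length_cons] at this ⊢
        omega

theorem pvMu3_go_lt (sep : List Char) (hsep : sep ≠ []) :
    ∀ fuel l cur acc, l.length ≤ fuel → (∃ j, sep <+: l.drop j) →
      pvMu3 (PySem.Chars.splitOn.go sep fuel l cur acc) <
        pvMu3 acc + 3 * cur.length + 3 * l.length + 2 := by
  intro fuel
  induction fuel with
  | zero =>
    intro l cur acc hl hj
    have hl0 : l = [] := List.eq_nil_of_length_eq_zero (Nat.le_zero.mp hl)
    subst hl0
    obtain ⟨j, hj⟩ := hj
    simp at hj
    exact absurd hj hsep
  | succ f ih =>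
    intro l cur acc hl hj
    match l with
    | [] =>
      obtain ⟨j, hj⟩ := hj
      simp at hj
      exact absurd hj hsep
    | c :: rest =>
      rw [PySem.Chars.splitOn.go]
      by_cases hp : sep.isPrefixOf (c :: rest) = true
      · rw [if_pos hp]
        have hsl : 1 ≤ sep.length := by
          cases sep with
          | nil => exact absurd rfl hsep
          | cons a b => simp
        have hle : sep.length ≤ (c :: rest).length :=
          (List.isPrefixOf_iff_prefix.mp hp).length_le
        have hfuel : ((c :: rest).drop sep.length).length ≤ f := by
          simp only [List.length_drop]
          omega
        have := pvMu3_go_le sep hsep f ((c :: rest).drop sep.length) [] (cur.reverse :: acc) hfuel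
        simp only [List.length_drop, List.length_nil, List.length_cons] at this ⊢
        have hacc : pvMu3 (cur.reverse :: acc) = pvMu3 acc + 3 * cur.length + 2 := by
          simp [pvMu3]; ring
        rw [hacc] at this
        simp only [List.length_cons] at hle ⊢
        omega
      · rw [if_neg hp]
        obtain ⟨j, hj⟩ := hj
        match j with
        | 0 =>
          simp only [List.drop_zero] at hj
          exact absurd (List.isPrefixOf_iff_prefix.mpr hj) hp
        | j' + 1 =>
          have hj' : ∃ j, sep <+: rest.drop j := ⟨j', by simpa using hj⟩
          have := ih rest (c :: cur) acc (by simpa using Nat.le_of_succ_le_succ (by simpa using hl)) hj'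
          simp only [List.length_cons] at this ⊢
          omega

-- key termination fact: when "_J_" occurs in s, the split parts are strictly smaller
theorem pvSplit_lt (s : String) (h : PySem.Str.isIn "_J_" s = true) :
    pvMuSel ((PySem.Str.split? s "_J_").getD []) < 3 * s.toList.length + 2 := by
  have hsep : ("_J_".toList : List Char) ≠ [] := by decide
  have hin : PySem.Chars.isIn "_J_".toList s.toList = true := by
    simpa using h
  have hj : ∃ j, "_J_".toList <+: s.toList.drop j :=
    (PySem.Chars.exists_prefix_drop_iff_isIn _ _).mpr hin
  have hlt := pvMu3_go_lt "_J_".toList hsep (s.toList.length + 1) s.toList [] []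
    (Nat.le_succ _) hj
  have hsplit : PySem.Str.split? s "_J_" =
      some ((PySem.Chars.splitOn s.toList "_J_".toList).map String.ofList) := by
    simp [PySem.Str.split?, PySem.Chars.split?]
  rw [hsplit]
  have hmm : pvMuSel ((PySem.Chars.splitOn s.toList "_J_".toList).map String.ofList) =
      pvMu3 (PySem.Chars.splitOn s.toList "_J_".toList) := by
    simp [pvMuSel, pvMu3, List.map_map, Function.comp_def]
  simp only [Option.getD_some]
  rw [hmm, PySem.Chars.splitOn]
  have h0 : pvMu3 ([] : List (List Char)) = 0 := rfl
  rw [h0] at hlt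
  simpa using hlt

theorem pvMuSel_cons (s : String) (rest : List String) :
    pvMuSel (s :: rest) = 3 * s.toList.length + 2 + pvMuSel rest := by
  simp [pvMuSel]

-- ===== PORT A =====
def getSelections (selections : List String) (successors1 : List String) : List String :=
  match selections with
  | [] => successors1
  | s :: rest =>
    if PySem.Str.isIn "_J_" s then
      -- s = s.split("_J_"); getSelections(s, successors1)   (sep ≠ "", split? is some)
      getSelections rest (getSelections ((PySem.Str.split? s "_J_").getD []) successors1)
    else if PySem.Str.startswith s "s" then
      getSelections rest (successors1 ++ [s])
    else
      getSelections rest successors1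
termination_by pvMuSel selections
decreasing_by
  · rw [pvMuSel_cons]
    have := pvSplit_lt s (by assumption)
    omega
  · rw [pvMuSel_cons]; omega
  · rw [pvMuSel_cons]; omega
  · rw [pvMuSel_cons]; omega

-- ===== PORT B =====
-- Source B: for s in selections: successors1.extend(p for p in s.split("_J_") if p.startswith("s"))
-- a fold over selections; extend = append of the filtered split pieces
def getSelections_alt (selections : List String) (successors1 : List String) : List String :=
  selections.foldl
    (fun acc s =>
      acc ++ ((PySem.Str.split? s "_J_").getD []).filter (fun p => PySem.Str.startswith p "s"))
    successors1

-- ===== PRECONDITION & SPEC =====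
def Spec_getSelections (selections : List String) (successors1 : List String) (out : List String) : Prop := out = getSelections_alt selections successors1
instance (selections : List String) (successors1 : List String) (out : List String) : Decidable (Spec_getSelections selections successors1 out) := by unfold Spec_getSelections; infer_instance

-- ===== CLAIM =====
def Claim_equal_getSelections : Prop := ∀ (selections : List String) (successors1 : List String), Dom_getSelections selections successors1 → Spec_getSelections selections successors1 (getSelections selections successors1)

-- ===== LEMMAS AND PROOFS =====

-- (1) the invariant run of splitOn.go when the separator never occurs
theorem pvGo_no_occ (sep : List Char) : ∀ fuel l cur acc, l.length ≤ fuel →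
    (∀ j, ¬ sep <+: l.drop j) →
    PySem.Chars.splitOn.go sep fuel l cur acc = ((cur.reverse ++ l) :: acc).reverse := by
  intro fuel
  induction fuel with
  | zero =>
    intro l cur acc hl _
    have hl0 : l = [] := List.eq_nil_of_length_eq_zero (Nat.le_zero.mp hl)
    subst hl0
    simp [PySem.Chars.splitOn.go]
  | succ f ih =>
    intro l cur acc hl hno
    match l with
    | [] => simp [PySem.Chars.splitOn.go]
    | c :: rest =>
      rw [PySem.Chars.splitOn.go]
      have hp : sep.isPrefixOf (c :: rest) = false := by
        by_contra h
        exact hno 0 (by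
          simpa using List.isPrefixOf_iff_prefix.mp (by simpa using Bool.of_not_eq_false h))
      rw [hp]
      simp only [Bool.false_eq_true, if_false]
      have := ih rest (c :: cur) acc
        (by simpa using Nat.le_of_succ_le_succ (by simpa using hl))
        (fun j => by simpa using hno (j + 1))
      rw [this]
      simp

-- s.split(sep) = [s] when sep does not occur in s
theorem pvSplitOn_no_occ (cs sep : List Char) (h : PySem.Chars.isIn sep cs = false) :
    PySem.Chars.splitOn cs sep = [cs] := by
  have hno : ∀ j, ¬ sep <+: cs.drop j := by
    intro j hj
    have : PySem.Chars.isIn sep cs = true :=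
      (PySem.Chars.exists_prefix_drop_iff_isIn _ _).mp ⟨j, hj⟩
    simp [this] at h
  rw [PySem.Chars.splitOn, pvGo_no_occ sep (cs.length + 1) cs [] [] (Nat.le_succ _) hno]
  simp

-- (2) split pieces never contain the separator
theorem pvGo_parts_no_sep (sep : List Char) (hsep : sep ≠ []) :
    ∀ fuel l cur acc, l.length < fuel →
    (∀ j < cur.length, ¬ sep <+: (cur.reverse ++ l).drop j) →
    (∀ p ∈ acc, PySem.Chars.isIn sep p = false) →
    ∀ p ∈ PySem.Chars.splitOn.go sep fuel l cur acc, PySem.Chars.isIn sep p = false := by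
  intro fuel
  induction fuel with
  | zero => intro l cur acc hl; omega
  | succ f ih =>
    intro l cur acc hl hcur hacc
    have hcurfree : PySem.Chars.isIn sep cur.reverse = false := by
      rw [PySem.Chars.isIn_eq_false_iff]
      intro hinf
      obtain ⟨j, hj⟩ := (PySem.Chars.exists_prefix_drop_iff_isIn _ _).mpr
        ((PySem.Chars.isIn_iff_infix _ _).mpr hinf)
      have hjlt : j < cur.length := by
        by_contra h
        have : cur.reverse.drop j = [] := by
          apply List.drop_eq_nil_of_le
          simpa using Nat.le_of_not_lt h
        rw [this] at hj
        exact hsep (List.prefix_nil.mp hj)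
      exact hcur j hjlt (by
        have : (cur.reverse ++ l).drop j = cur.reverse.drop j ++ l := by
          rw [List.drop_append_of_le_length (by simpa using Nat.le_of_lt hjlt)]
        rw [this]
        exact hj.trans (List.prefix_append _ _))
    match l with
    | [] =>
      rw [PySem.Chars.splitOn.go]
      · intro p hp
        simp only [List.mem_reverse, List.mem_cons] at hp
        rcases hp with h | h
        · subst h; exact hcurfree
        · exact hacc p h
      · omega
    | c :: rest =>
      rw [PySem.Chars.splitOn.go]
      by_cases hp : sep.isPrefixOf (c :: rest) = true
      · rw [if_pos hp]
        have hle : sep.length ≤ (c :: rest).length :=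
          (List.isPrefixOf_iff_prefix.mp hp).length_le
        apply ih ((c :: rest).drop sep.length) [] (cur.reverse :: acc)
        · simp only [List.length_drop, List.length_cons]
          simp only [List.length_cons] at hl
          have hsl : 1 ≤ sep.length := by
            cases sep with
            | nil => exact absurd rfl hsep
            | cons a b => simp
          omega
        · intro j hj; simp at hj
        · intro p hpm
          rcases List.mem_cons.mp hpm with h | h
          · subst h; exact hcurfree
          · exact hacc p h
      · rw [if_neg hp]
        apply ih rest (c :: cur) acc
        · simp only [List.length_cons] at hl ⊢
          omega
        · intro j hj
          have heq : (c :: cur).reverse ++ rest = cur.reverse ++ (c :: rest) := by simp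
          rw [heq]
          simp only [List.length_cons] at hj
          rcases Nat.lt_or_ge j cur.length with hlt | hge
          · exact hcur j hlt
          · have hjeq : j = cur.length := by omega
            subst hjeq
            rw [List.drop_append_of_le_length (by simp), List.drop_reverse]
            simp only [Nat.sub_self, List.take_zero, List.reverse_nil, List.nil_append]
            intro hpre
            exact hp (List.isPrefixOf_iff_prefix.mpr hpre)
        · exact hacc

theorem pvSplitOn_parts_no_sep (cs sep : List Char) (hsep : sep ≠ []) :
    ∀ p ∈ PySem.Chars.splitOn cs sep, PySem.Chars.isIn sep p = false := by
  rw [PySem.Chars.splitOn]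
  exact pvGo_parts_no_sep sep hsep (cs.length + 1) cs [] [] (Nat.lt_succ_self _)
    (fun j hj => by simp at hj) (fun p hp => by simp at hp)

-- A on a list of separator-free strings is append-the-filter
theorem pvA_flat (parts : List String)
    (hfree : ∀ p ∈ parts, PySem.Str.isIn "_J_" p = false) :
    ∀ acc, getSelections parts acc =
      acc ++ parts.filter (fun p => PySem.Str.startswith p "s") := by
  induction parts with
  | nil => intro acc; simp [getSelections]
  | cons s rest ih =>
    intro acc
    have hs : PySem.Str.isIn "_J_" s = false := hfree s (by simp)
    rw [getSelections]
    simp only [hs, Bool.false_eq_true, if_false]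
    by_cases hst : PySem.Str.startswith s "s" = true
    · have hst' : PySem.Chars.startswith s.toList ['s'] = true := by simpa using hst
      rw [if_pos hst, ih (fun p hp => hfree p (by simp [hp])) (acc ++ [s])]
      simp [hst']
    · have hst' : PySem.Chars.startswith s.toList ['s'] = false := by simpa using hst
      rw [if_neg hst, ih (fun p hp => hfree p (by simp [hp])) acc]
      simp [hst']

-- when "_J_" occurs in s, A's inner recursive call is the filtered split, appended
theorem pvA_inner (s : String) (h : PySem.Str.isIn "_J_" s = true) (acc : List String) :
    getSelections ((PySem.Str.split? s "_J_").getD []) acc =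
      acc ++ ((PySem.Str.split? s "_J_").getD []).filter
        (fun p => PySem.Str.startswith p "s") := by
  apply pvA_flat
  intro p hp
  have hsplit : PySem.Str.split? s "_J_" =
      some ((PySem.Chars.splitOn s.toList "_J_".toList).map String.ofList) := by
    simp [PySem.Str.split?, PySem.Chars.split?]
  rw [hsplit] at hp
  simp only [Option.getD_some, List.mem_map] at hp
  obtain ⟨cs, hcs, rfl⟩ := hp
  have := pvSplitOn_parts_no_sep s.toList "_J_".toList (by decide) cs hcs
  simpa [PySem.Str.isIn] using this

-- when "_J_" does not occur, s.split("_J_") = [s]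
theorem pvSplit_single (s : String) (hni : PySem.Str.isIn "_J_" s = false) :
    (PySem.Str.split? s "_J_").getD [] = [s] := by
  have hsplit : PySem.Str.split? s "_J_" =
      some ((PySem.Chars.splitOn s.toList "_J_".toList).map String.ofList) := by
    simp [PySem.Str.split?, PySem.Chars.split?]
  rw [hsplit]
  have hchars : PySem.Chars.isIn "_J_".toList s.toList = false := by
    simpa [PySem.Str.isIn] using hni
  rw [Option.getD_some, pvSplitOn_no_occ s.toList "_J_".toList hchars]
  simp

-- main equivalence, by structural induction on selections
theorem pvMain : ∀ (selections acc : List String),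
    getSelections selections acc = getSelections_alt selections acc := by
  intro selections
  induction selections with
  | nil => intro acc; simp [getSelections, getSelections_alt]
  | cons s rest ih =>
    intro acc
    rw [getSelections]
    by_cases h1 : PySem.Str.isIn "_J_" s = true
    · simp only [h1, if_true]
      rw [pvA_inner s h1 acc, ih]
      rfl
    · simp only [h1, Bool.false_eq_true, if_false]
      have hsingle := pvSplit_single s (by simpa using h1)
      by_cases h2 : PySem.Str.startswith s "s" = true
      · have h2' : PySem.Chars.startswith s.toList ['s'] = true := by simpa using h2
        rw [if_pos h2, ih]
        unfold getSelections_alt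
        simp [hsingle, h2']
      · have h2' : PySem.Chars.startswith s.toList ['s'] = false := by simpa using h2
        rw [if_neg h2, ih]
        unfold getSelections_alt
        simp [hsingle, h2']

-- ===== VERDICT =====
theorem getSelections_spec : Claim_equal_getSelections := by
  intro selections successors1 _
  unfold Spec_getSelections
  exact pvMain selections successors1
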